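-- pv_equiv track=rewrite | github.com/Joana-padrao/Algoritmos-e-programacao | TPC5/TPC5.py | simplificarPol
-- ===== SOURCE A (Python) =====
-- def chaveOrd(t):
--     c,e = t
--     return e
--
-- def ordenarPol(p):
--     p.sort(reverse=True,key=chaveOrd)
--     return p
--
-- def simplificarPol(p):
--     res =[]
--     n=""
--     coef=0
--     pol=0
--     ordenarPol(p)
--     for t in p:
--         c,e =t
--         if n=="":
--             n=t
--             pol=e
--             coef=c
--             res.append((c,e))
--         else:
--             if pol==e:
--                 coef=coef+c
--                 del res[-1]
--                 res.append((coef,e))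
--                 pol=e
--             else:
--                 res.append((c,e))
--                 coef=c
--                 pol=e
--     return res
-- ===== SOURCE B (Python) =====
-- def simplificarPol(p):
--     p.sort(reverse=True, key=lambda t: t[1])
--     d = {}
--     for c, e in p:
--         d[e] = d[e] + c if e in d else c
--     return [(coef, e) for e, coef in d.items()]
-- ===== Notes on version B (the rewrite author's own statement) =====
-- stated objective: simpler
-- what changed: A tracks the previous exponent with pol/coef flags and patches the result list with del res[-1]/append; B sorts the same way and then accumulates coefficients in a dict keyed by exponent, emitting the dict items at the end.
import Mathlib
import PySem

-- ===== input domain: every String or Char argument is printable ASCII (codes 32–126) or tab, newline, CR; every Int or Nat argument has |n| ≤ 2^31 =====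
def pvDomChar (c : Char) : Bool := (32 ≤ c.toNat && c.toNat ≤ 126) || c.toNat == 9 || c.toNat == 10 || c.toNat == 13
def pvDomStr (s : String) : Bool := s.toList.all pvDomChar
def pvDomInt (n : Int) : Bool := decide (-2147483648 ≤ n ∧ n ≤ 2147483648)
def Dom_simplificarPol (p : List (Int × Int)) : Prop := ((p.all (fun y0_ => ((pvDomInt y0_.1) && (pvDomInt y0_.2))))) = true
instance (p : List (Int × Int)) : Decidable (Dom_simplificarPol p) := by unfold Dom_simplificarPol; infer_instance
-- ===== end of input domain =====

-- B replaces A's last-element bookkeeping (pol/coef/del res[-1]) by a dict accumulator keyed by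
-- exponent (objective: simpler). Both A and B sort p in place; the equivalence proved is about the
-- return value (the in-place sort side effect is identical in both).


-- ===== PORT A =====
-- loop body of A's for-loop; state = (n-nonempty flag, coef, pol, res)
-- (A's n is only ever compared with ""; its value after the first iteration is never read, so it is a flag)
def stepA (st : Bool × Int × Int × List (Int × Int)) (t : Int × Int) :
    Bool × Int × Int × List (Int × Int) :=
  let c := t.1
  let e := t.2
  if st.1 = false then
    (true, c, e, st.2.2.2 ++ [t])
  else if st.2.2.1 = e then
    (true, st.2.1 + c, e, st.2.2.2.dropLast ++ [(st.2.1 + c, e)])  -- del res[-1]; res.append(...)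
  else
    (true, c, e, st.2.2.2 ++ [(c, e)])

def simplificarPol (p : List (Int × Int)) : List (Int × Int) :=
  ((PySem.List.sorted p (fun t => t.2) true).foldl stepA (false, 0, 0, [])).2.2.2

-- ===== PORT B =====
-- loop body of B's for-loop: d[e] = d[e] + c if e in d else c
def stepB (d : PySem.Dict Int Int) (t : Int × Int) : PySem.Dict Int Int :=
  d.insert t.2 (if d.contains t.2 then d.getD t.2 0 + t.1 else t.1)

def simplificarPol_alt (p : List (Int × Int)) : List (Int × Int) :=
  (((PySem.List.sorted p (fun t => t.2) true).foldl stepB PySem.Dict.empty).items).map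
    (fun q => (q.2, q.1))

-- ===== PRECONDITION & SPEC =====
def Spec_simplificarPol (p : List (Int × Int)) (out : List (Int × Int)) : Prop := out = simplificarPol_alt p
instance (p : List (Int × Int)) (out : List (Int × Int)) : Decidable (Spec_simplificarPol p out) := by unfold Spec_simplificarPol; infer_instance

-- ===== CLAIM (what is proved, stated in full; the proofs are below) =====
def Claim_equal_simplificarPol : Prop := ∀ (p : List (Int × Int)), Dom_simplificarPol p → Spec_simplificarPol p (simplificarPol p)

-- ===== LEMMAS AND PROOFS =====

-- replacing the (unique) last-keyed entry: the map done by Dict.insert on a contained key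
lemma map_replace_last_key (init : List (Int × Int)) (e coef v : Int)
    (hnd : ((init ++ [(e, coef)]).map (·.1)).Nodup) :
    (init ++ [(e, coef)]).map (fun p => if p.1 == e then (e, v) else p) = init ++ [(e, v)] := by
  have hini : ∀ q ∈ init, q.1 ≠ e := by
    intro q hq
    rw [List.map_append, List.nodup_append] at hnd
    intro hqe
    exact hnd.2.2 q.1 (List.mem_map_of_mem hq) e (by simp) hqe
  rw [List.map_append]
  congr 1
  · conv_rhs => rw [← List.map_id init]
    apply List.map_congr_left
    intro q hq
    simp [hini q hq]
  · simp

-- main loop invariant: with the dict's keys strictly decreasing and (pol, coef) its last item,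
-- A's tail loop and B's tail loop stay in lockstep on a list of non-increasing exponents
lemma loop_eq : ∀ (l : List (Int × Int)) (d : PySem.Dict Int Int) (coef pol : Int),
    d.keys.Pairwise (· > ·) →
    d.items.getLast? = some (pol, coef) →
    (∀ t ∈ l, t.2 ≤ pol) →
    l.Pairwise (fun a b => b.2 ≤ a.2) →
    (l.foldl stepA (true, coef, pol, d.items.map (fun q => (q.2, q.1)))).2.2.2
      = ((l.foldl stepB d).items).map (fun q => (q.2, q.1)) := by
  intro l
  induction l with
  | nil => intro d coef pol _ _ _ _; simp [List.foldl]
  | cons t l ih =>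
    intro d coef pol hpw hlast hall hsorted
    obtain ⟨init, hit⟩ := List.getLast?_eq_some_iff.mp hlast
    have hknd : d.keys.Nodup := hpw.imp (fun h => (ne_of_lt h).symm)
    have hkeys : d.keys = init.map (·.1) ++ [pol] := by
      show d.items.map (·.1) = _
      rw [hit]; simp
    have hhead : ∀ u ∈ l, u.2 ≤ t.2 := (List.pairwise_cons.mp hsorted).1
    have htail : l.Pairwise (fun a b => b.2 ≤ a.2) := (List.pairwise_cons.mp hsorted).2
    have htle : t.2 ≤ pol := hall t (List.mem_cons_self)
    by_cases hpe : pol = t.2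
    · -- same exponent: B overwrites the (unique, last) key; A deletes and re-appends the last item
      subst hpe
      have hcont : d.contains t.2 = true := by
        rw [PySem.Dict.contains_eq_decide_mem_keys, hkeys]; simp
      have hgetD : d.getD t.2 0 = coef :=
        PySem.Dict.getD_of_mem_items d (by rw [hit]; simp) hknd 0
      have hstepB : (stepB d t).items = init ++ [(t.2, coef + t.1)] := by
        simp only [stepB, hcont, if_pos, hgetD]
        rw [PySem.Dict.items_insert_of_contains d _ hcont, hit]
        exact map_replace_last_key init t.2 coef (coef + t.1)
          (by rw [← hit]; exact hknd)
      have hA : stepA (true, coef, t.2, d.items.map (fun q => (q.2, q.1))) t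
          = (true, coef + t.1, t.2, (stepB d t).items.map (fun q => (q.2, q.1))) := by
        simp [stepA, hstepB, hit]
      have hpw2 : (stepB d t).keys.Pairwise (· > ·) := by
        have : (stepB d t).keys = d.keys := by
          show (stepB d t).items.map (·.1) = d.items.map (·.1)
          rw [hstepB, hit]; simp
        rw [this]; exact hpw
      have hlast2 : (stepB d t).items.getLast? = some (t.2, coef + t.1) := by
        rw [hstepB]; simp
      rw [List.foldl_cons, List.foldl_cons, hA]
      exact ih (stepB d t) (coef + t.1) t.2 hpw2 hlast2 hhead htail
    · -- new (smaller) exponent: both append a fresh entry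
      have hlt : t.2 < pol := lt_of_le_of_ne htle (fun h => hpe h.symm)
      have hgt : ∀ k ∈ d.keys, t.2 < k := by
        intro k hk
        rw [hkeys] at hk
        rcases List.mem_append.mp hk with hk | hk
        · have := (List.pairwise_append.mp (hkeys ▸ hpw)).2.2 k hk pol (by simp)
          omega
        · simp at hk; omega
      have hcont : d.contains t.2 = false := by
        rw [PySem.Dict.contains_eq_decide_mem_keys]
        simp only [decide_eq_false_iff_not]
        intro hmem
        exact absurd rfl (ne_of_lt (hgt _ hmem))
      have hstepB : (stepB d t).items = d.items ++ [(t.2, t.1)] := by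
        simp only [stepB, hcont]
        rw [if_neg (by simp), PySem.Dict.items_insert_of_not_contains d _ hcont]
      have hA : stepA (true, coef, pol, d.items.map (fun q => (q.2, q.1))) t
          = (true, t.1, t.2, (stepB d t).items.map (fun q => (q.2, q.1))) := by
        simp [stepA, hstepB, hpe]
      have hpw2 : (stepB d t).keys.Pairwise (· > ·) := by
        have hk2 : (stepB d t).keys = d.keys ++ [t.2] := by
          show (stepB d t).items.map (·.1) = d.items.map (·.1) ++ _
          rw [hstepB]; simp
        rw [hk2, List.pairwise_append]
        exact ⟨hpw, by simp, by intro a ha b hb; simp at hb; subst hb; exact hgt a ha⟩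
      have hlast2 : (stepB d t).items.getLast? = some (t.2, t.1) := by
        rw [hstepB]; simp
      rw [List.foldl_cons, List.foldl_cons, hA]
      exact ih (stepB d t) t.1 t.2 hpw2 hlast2 hhead htail

-- ===== VERDICT (by name: the statement is the Claim_ definition above) =====
theorem simplificarPol_spec : Claim_equal_simplificarPol := by
  intro p _
  unfold Spec_simplificarPol simplificarPol simplificarPol_alt
  have hsp := PySem.List.sorted_pairwise_rev p (fun t => t.2)
  cases hs : PySem.List.sorted p (fun t => t.2) true with
  | nil => rfl
  | cons t rest =>
    rw [hs] at hsp
    rw [List.foldl_cons, List.foldl_cons]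
    have hB1 : (stepB PySem.Dict.empty t).items = [(t.2, t.1)] := by
      simp only [stepB]
      rw [if_neg (by simp [PySem.Dict.contains_empty]),
        PySem.Dict.items_insert_of_not_contains _ _ (PySem.Dict.contains_empty t.2)]
      rfl
    have hA1 : stepA (false, 0, 0, []) t
        = (true, t.1, t.2, (stepB PySem.Dict.empty t).items.map (fun q => (q.2, q.1))) := by
      simp [stepA, hB1]
    rw [hA1]
    exact loop_eq rest (stepB PySem.Dict.empty t) t.1 t.2
      (by show ((stepB PySem.Dict.empty t).items.map (·.1)).Pairwise (· > ·)
          rw [hB1]; simp)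
      (by rw [hB1]; rfl)
      (List.pairwise_cons.mp hsp).1
      (List.pairwise_cons.mp hsp).2
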